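-- pv_equiv track=rewrite | github.com/jeremiahmushtaq/SequenceAnalyser | logic/classification_of_amino_acids.py | AAtypes
-- ===== SOURCE A (Python) =====
-- def AAtypes (aa_seq):
--     """
--     This function takes as its argument a string containing a sequence of aminoacids.
--     The function computes, for each protein, the fraction of aminoacids that are polar,
--     small and hydrophobic and return that as a list.
--     """
--
--     #Build list of relavent residues
--     polar = 'HKRWYDENQSTC'
--     small = 'PNDVTSCGA'
--     hydrophobic = 'ILVFYWHKMCTA'
--
--     #Segregate relavent residues in amino acid sequence
--     polar_in_seq = [x for x in aa_seq if x in polar]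
--     small_in_seq = [x for x in aa_seq if x in small]
--     hydrophobic_in_seq = [x for x in aa_seq if x in hydrophobic]
--
--     #Calculating fractions
--     fraction_polar = len(polar_in_seq) / len(aa_seq)
--     fraction_small = len(small_in_seq) / len(aa_seq)
--     fraction_hydrophobic = len(hydrophobic_in_seq) / len(aa_seq)
--
--     #Changing fractions to 2 decimal points
--     polar_2dp = ("%.2f" % fraction_polar)
--     small_2dp = ("%.2f" % fraction_small)
--     hydrophobic_2dp = ("%.2f" % fraction_hydrophobic)
--
--     #Assemble in list
--     fractions = [polar_2dp, small_2dp, hydrophobic_2dp]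
--
--     #Return fractions
--     return (fractions)
-- ===== SOURCE B (Python) =====
-- def AAtypes(aa_seq):
--     """Idiomatic rewrite: one frequency-table pass over the sequence, then
--     constant-size sums over each category's letters."""
--     counts = {}
--     for x in aa_seq:
--         counts[x] = counts.get(x, 0) + 1
--     n = len(aa_seq)
--     categories = ['HKRWYDENQSTC', 'PNDVTSCGA', 'ILVFYWHKMCTA']
--     return ["%.2f" % (sum(counts.get(r, 0) for r in cat) / n) for cat in categories]
-- ===== Notes on version B (the rewrite author's own statement) =====
-- stated objective: idiomatic
-- what changed: B builds one character-frequency dictionary of the sequence and sums table hits over each category's letters, replacing A's three full-sequence filtering scans.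
-- outside the precondition, e.g. on AAtypes(''): A raises ZeroDivisionError, B raises ZeroDivisionError
import Mathlib
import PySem

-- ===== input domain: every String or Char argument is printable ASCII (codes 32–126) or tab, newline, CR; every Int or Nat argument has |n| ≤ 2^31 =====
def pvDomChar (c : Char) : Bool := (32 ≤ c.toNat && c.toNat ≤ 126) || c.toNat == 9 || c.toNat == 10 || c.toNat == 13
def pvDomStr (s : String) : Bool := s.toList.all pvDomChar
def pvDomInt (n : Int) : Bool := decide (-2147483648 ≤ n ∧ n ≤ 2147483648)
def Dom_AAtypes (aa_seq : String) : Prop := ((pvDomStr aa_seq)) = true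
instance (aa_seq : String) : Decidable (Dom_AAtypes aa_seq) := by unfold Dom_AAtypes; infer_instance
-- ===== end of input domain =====

-- B replaces A's three whole-sequence scans by one frequency-table pass plus
-- constant-size sums over each category's letters (objective: idiomatic/alternative).

-- Shared helper: exact model of Python's `"%.2f" % (k / n)` for 0 ≤ k ≤ n, 0 < n
-- (both Pythons perform this same built-in float division + formatting).
-- round-half-even of a/b to the nearest integer (IEEE-754 / printf tie rule)
def pvRhe (a b : Nat) : Nat :=
  let q := a / b
  let r := a % b
  if 2 * r < b then q
  else if b < 2 * r then q + 1
  else if q % 2 = 0 then q else q + 1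

-- `"%.2f" % (k/n)`: round k/n to the nearest binary64 (53-bit significand,
-- round-half-even), then round that exact binary value to 2 decimals half-even,
-- as CPython's float formatting does.  Exact for 0 ≤ k ≤ n, 0 < n (the only
-- calls under Pre_); returns "0.00" at n = 0 where Python raises (excluded by Pre_).
def pvFmt2 (ki n : Int) : String :=
  let k := ki.toNat
  let n := n.toNat
  if k = 0 then "0.00"
  else
    let s0 := Nat.log2 (2 ^ 52 * n / k)
    let s := if 2 ^ 52 * n ≤ k * 2 ^ s0 then s0 else s0 + 1
    let m := pvRhe (k * 2 ^ s) n          -- binary64 significand of k/n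
    let r := pvRhe (100 * m) (2 ^ s)      -- 2-decimal rounding of the exact float
    if r = 100 then "1.00"
    else "0." ++ (if r < 10 then "0" ++ PySem.Int.toStr r else PySem.Int.toStr r)

-- ===== PORT A =====
def AAtypes (aa_seq : String) : List String :=
  let polar := "HKRWYDENQSTC"
  let small := "PNDVTSCGA"
  let hydrophobic := "ILVFYWHKMCTA"
  let cs := aa_seq.toList
  -- `x in polar` on a 1-char x is char membership in the string
  let polar_in_seq := cs.filter (fun x => polar.toList.contains x)
  let small_in_seq := cs.filter (fun x => small.toList.contains x)
  let hydrophobic_in_seq := cs.filter (fun x => hydrophobic.toList.contains x)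
  let polar_2dp := pvFmt2 (polar_in_seq.length : Int) (cs.length : Int)
  let small_2dp := pvFmt2 (small_in_seq.length : Int) (cs.length : Int)
  let hydrophobic_2dp := pvFmt2 (hydrophobic_in_seq.length : Int) (cs.length : Int)
  [polar_2dp, small_2dp, hydrophobic_2dp]

-- ===== PORT B =====
def AAtypes_alt (aa_seq : String) : List String :=
  let counts : PySem.Dict Char Int :=
    aa_seq.toList.foldl (fun d x => d.insert x (d.getD x 0 + 1)) PySem.Dict.empty
  let n := aa_seq.toList.length
  ["HKRWYDENQSTC", "PNDVTSCGA", "ILVFYWHKMCTA"].map (fun cat =>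
    pvFmt2 (cat.toList.foldl (fun acc r => acc + counts.getD r 0) (0 : Int)) (n : Int))

-- ===== PRECONDITION & SPEC =====
-- Pre_ excludes only the empty string, on which A raises ZeroDivisionError.
def Pre_AAtypes (aa_seq : String) : Prop := aa_seq ≠ ""
instance (aa_seq : String) : Decidable (Pre_AAtypes aa_seq) := by unfold Pre_AAtypes; infer_instance
def pvWitness_AAtypes : String := "ACDH"

def Spec_AAtypes (aa_seq : String) (out : List String) : Prop := out = AAtypes_alt aa_seq
instance (aa_seq : String) (out : List String) : Decidable (Spec_AAtypes aa_seq out) := by unfold Spec_AAtypes; infer_instance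

-- ===== CLAIM (what is proved, stated in full; the proofs are below) =====
def Claim_equal_AAtypes : Prop := ∀ (aa_seq : String), Dom_AAtypes aa_seq → Pre_AAtypes aa_seq → Spec_AAtypes aa_seq (AAtypes aa_seq)

-- ===== LEMMAS AND PROOFS =====

theorem foldl_add_shift (f : Char → Int) (P : List Char) (a : Int) :
    P.foldl (fun acc r => acc + f r) a = a + P.foldl (fun acc r => acc + f r) 0 := by
  induction P generalizing a with
  | nil => simp
  | cons p P ih => simp only [List.foldl_cons]; rw [ih, ih (0 + f p)]; ring

theorem countP_cons_contains (p : Char) (P : List Char) (cs : List Char) (hp : p ∉ P) :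
    cs.countP (fun x => (p :: P).contains x) = cs.count p + cs.countP (fun x => P.contains x) := by
  induction cs with
  | nil => simp
  | cons c cs ih =>
    simp only [List.countP_cons, List.count_cons, ih]
    by_cases hc : c = p
    · subst hc
      simp [hp]; omega
    · simp only [List.contains_cons]
      split_ifs <;> simp_all <;> omega

theorem sum_count_eq_filter (P cs : List Char) (hP : P.Nodup) :
    P.foldl (fun acc r => acc + ((cs.count r : Nat) : Int)) 0
      = ((cs.filter (fun x => P.contains x)).length : Int) := by
  induction P with
  | nil =>
    simp
  | cons p P ih =>
    have hp : p ∉ P := (List.nodup_cons.mp hP).1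
    have hPn : P.Nodup := (List.nodup_cons.mp hP).2
    simp only [List.foldl_cons]
    rw [foldl_add_shift, ih hPn]
    simp only [← List.countP_eq_length_filter]
    rw [countP_cons_contains p P cs hp]
    push_cast
    ring

theorem cat_sum_eq (P cs : List Char) (hP : P.Nodup) :
    P.foldl (fun acc r => acc + (PySem.Dict.counter cs).getD r 0) (0 : Int)
      = ((cs.filter (fun x => P.contains x)).length : Int) := by
  have h : ∀ (a : Int) , P.foldl (fun acc r => acc + (PySem.Dict.counter cs).getD r 0) a
      = P.foldl (fun acc r => acc + ((cs.count r : Nat) : Int)) a := by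
    intro a
    induction P generalizing a with
    | nil => rfl
    | cons p P ih => simp only [List.foldl_cons, PySem.Dict.getD_counter]
  rw [h, sum_count_eq_filter P cs hP]

-- ===== VERDICT (by name: the statement is the Claim_ definition above) =====
theorem AAtypes_spec : Claim_equal_AAtypes := by
  intro aa_seq _ _
  unfold Spec_AAtypes AAtypes AAtypes_alt
  rw [PySem.Dict.foldl_insert_getD_add_one_eq_counter]
  simp only [List.map]
  rw [cat_sum_eq _ _ (by decide), cat_sum_eq _ _ (by decide), cat_sum_eq _ _ (by decide)]
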